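-- pv_equiv track=rewrite | github.com/wxxz8008/algo-study | pg_42895_N으로표현.py | solution
-- ===== SOURCE A (Python) =====
-- def solution(N, number):
--     dp = []
--
--     for cnt in range(1, 9): # 1 ~ 8 모두 확인하기
--         cnt_set = set()
--         cnt_set.add(int(str(N) * cnt))
--         for i in range(0, cnt - 1): # dp[] 길이만큼
--             for x in dp[i]:
--                 for y in dp[-i-1]:
--                     cnt_set.add(x + y)
--                     cnt_set.add(abs(x - y))
--                     cnt_set.add(x * y)
--                     if y != 0:
--                         cnt_set.add(x // y)
--         if number in cnt_set:
--             return cnt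
--         dp.append(cnt_set)
--
--     return -1
-- ===== SOURCE B (Python) =====
-- def solution(N, number):
--     memo = {}
--
--     def build(cnt):
--         # set of all values expressible with exactly cnt copies of N
--         if cnt not in memo:
--             vals = {int(str(N) * cnt)}
--             for a in range(1, cnt):
--                 for x in build(a):
--                     for y in build(cnt - a):
--                         vals.update((x + y, abs(x - y), x * y))
--                         if y != 0:
--                             vals.add(x // y)
--             memo[cnt] = vals
--         return memo[cnt]
--
--     for cnt in range(1, 9):
--         if number in build(cnt):
--             return cnt
--     return -1
-- ===== Notes on version B (the rewrite author's own statement) =====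
-- stated objective: alternative
-- what changed: Replaces A's bottom-up dp list (built inside the search loop, indexed with dp[i]/dp[-i-1], with an early return mid-construction) by a top-down memoized recursion build(cnt) over splits a+(cnt-a), with a separate first-hit scan over cnt=1..8.
import Mathlib
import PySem

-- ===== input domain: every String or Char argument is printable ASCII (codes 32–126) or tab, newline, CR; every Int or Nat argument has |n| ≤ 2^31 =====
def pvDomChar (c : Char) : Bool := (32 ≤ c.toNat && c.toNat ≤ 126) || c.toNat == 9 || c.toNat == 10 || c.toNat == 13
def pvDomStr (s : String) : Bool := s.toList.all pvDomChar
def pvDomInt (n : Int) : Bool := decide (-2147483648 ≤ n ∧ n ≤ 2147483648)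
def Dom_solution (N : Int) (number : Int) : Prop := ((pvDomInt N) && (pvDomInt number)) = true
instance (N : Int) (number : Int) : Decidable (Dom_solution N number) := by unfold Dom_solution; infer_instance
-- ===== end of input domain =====

-- B replaces A's bottom-up dp table (with early return mid-loop) by a top-down recursion build(cnt)
-- over splits a + (cnt-a), plus a separate first-hit scan; objective: alternative decomposition, same cost.

-- ===== PORT A =====
-- int(str(N) * cnt): hand port (string repetition then int()); exact for 0 ≤ N (guaranteed by
-- Pre_solution wherever this value is reached); the .getD 0 default is unreachable inside Pre_.
def pvRep (N : Int) (cnt : Int) : Int :=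
  (PySem.Int.ofChars? (List.flatten (List.replicate cnt.toNat (PySem.Int.toChars N)))).getD 0

-- the four cnt_set.add(...) lines of A's innermost loop
def aInsert (s : PySem.Set Int) (x y : Int) : PySem.Set Int :=
  let s := PySem.Set.add s (x + y)
  let s := PySem.Set.add s |x - y|
  let s := PySem.Set.add s (x * y)
  if y ≠ 0 then PySem.Set.add s (PySem.Int.floordiv x y) else s

-- "for x in xs: for y in ys: ..." of A
def aCombine (s : PySem.Set Int) (xs ys : List Int) : PySem.Set Int :=
  xs.foldl (fun s x => ys.foldl (fun s y => aInsert s x y) s) s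

-- one round of A's outer loop: cnt_set = {int(str(N)*cnt)}; for i in range(0, cnt-1): combine dp[i], dp[-i-1]
def aCntSet (N : Int) (dp : List (PySem.Set Int)) (cnt : Int) : PySem.Set Int :=
  (PySem.List.pyRange 0 (cnt - 1) 1).foldl
    (fun s i => aCombine s (PySem.List.pyGetD dp i PySem.Set.empty)
                           (PySem.List.pyGetD dp (-i - 1) PySem.Set.empty))
    (PySem.Set.add PySem.Set.empty (pvRep N cnt))

-- A's outer "for cnt in range(1, 9)" with its early return and dp.append
def aGo (N : Int) (number : Int) (dp : List (PySem.Set Int)) : List Int → Int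
  | [] => -1
  | cnt :: rest =>
    let cntSet := aCntSet N dp cnt
    if PySem.Set.contains cntSet number then cnt
    else aGo N number (dp ++ [cntSet]) rest

def solution (N : Int) (number : Int) : Int :=
  aGo N number [] (PySem.List.pyRange 1 9 1)

-- ===== PORT B =====
-- B's innermost body: vals.update((x+y, abs(x-y), x*y)); if y != 0: vals.add(x // y)
def bInsert (vals : PySem.Set Int) (x y : Int) : PySem.Set Int :=
  let vals := PySem.Set.update vals [x + y, |x - y|, x * y]
  if y ≠ 0 then PySem.Set.add vals (PySem.Int.floordiv x y) else vals

-- Source B's build(cnt): the memo dict is pure caching, ported as plain structural recursion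
def buildB (N : Int) (cnt : Nat) : PySem.Set Int :=
  (List.range' 1 (cnt - 1)).attach.foldl
    (fun vals a =>
      (buildB N a.1).foldl (fun vals x =>
        (buildB N (cnt - a.1)).foldl (fun vals y => bInsert vals x y) vals) vals)
    (PySem.Set.ofList [pvRep N (cnt : Int)])
termination_by cnt
decreasing_by
  · have := List.mem_range'_1.mp a.2; omega
  · have := List.mem_range'_1.mp a.2; omega

-- Source B's main loop: first cnt in range(1, 9) with number in build(cnt), else -1
def altGo (N : Int) (number : Int) : List Int → Int
  | [] => -1
  | cnt :: rest =>
    if PySem.Set.contains (buildB N cnt.toNat) number then cnt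
    else altGo N number rest

def solution_alt (N : Int) (number : Int) : Int :=
  altGo N number (PySem.List.pyRange 1 9 1)

-- ===== PRECONDITION & SPEC =====
-- Pre_ excludes exactly the inputs where Python A raises ValueError: for N < 0, int(str(N)*cnt)
-- with cnt ≥ 2 parses "-3-3"-like strings, reached unless the cnt = 1 round already returned (number = N).
def Pre_solution (N : Int) (number : Int) : Prop := 0 ≤ N ∨ number = N
instance (N : Int) (number : Int) : Decidable (Pre_solution N number) := by unfold Pre_solution; infer_instance
def pvWitness_solution : Int × Int := (5, 12)

def Spec_solution (N : Int) (number : Int) (out : Int) : Prop := out = solution_alt N number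
instance (N : Int) (number : Int) (out : Int) : Decidable (Spec_solution N number out) := by unfold Spec_solution; infer_instance

-- ===== CLAIM (what is proved, stated in full; the proofs are below) =====
def Claim_equal_solution : Prop := ∀ (N : Int) (number : Int), Dom_solution N number → Pre_solution N number → Spec_solution N number (solution N number)

-- ===== LEMMAS AND PROOFS =====
-- dp after k completed rounds: dp[i] holds the values expressible with i+1 copies of N
def buildList (N : Int) (k : Nat) : List (PySem.Set Int) :=
  (List.range k).map fun i => buildB N (i + 1)

theorem aInsert_eq_bInsert : @aInsert = @bInsert := by
  funext s x y; rfl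

theorem length_buildList (N : Int) (k : Nat) : (buildList N k).length = k := by
  simp [buildList]

-- one round of A on the correct dp produces exactly B's build set
theorem aCntSet_eq_buildB (N : Int) (c : Nat) (hc : 1 ≤ c) :
    aCntSet N (buildList N (c - 1)) (c : Int) = buildB N c := by
  unfold aCntSet
  rw [buildB]
  rw [List.foldl_attach (f := fun vals (a : Nat) =>
        (buildB N a).foldl (fun vals x =>
          (buildB N (c - a)).foldl (fun vals y => bInsert vals x y) vals) vals)]
  rw [List.range'_eq_map_range, List.foldl_map]
  have hc1 : (c : Int) - 1 = ((c - 1 : Nat) : Int) := by omega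
  rw [hc1, PySem.List.pyRange_zero_nat, List.foldl_map]
  have hbase : PySem.Set.add PySem.Set.empty (pvRep N c) = PySem.Set.ofList [pvRep N (c : Int)] := rfl
  rw [hbase]
  apply PySem.List.foldl_congr_mem
  intro acc k hk
  have hk' : k < c - 1 := List.mem_range.mp hk
  have h1 : PySem.List.pyGetD (buildList N (c - 1)) ((k : Nat) : Int) PySem.Set.empty
      = buildB N (k + 1) := by
    rw [PySem.List.pyGetD_natCast]
    simp [buildList, List.getD_eq_getElem?_getD, hk']
  have hneg : (-(k : Int) - 1) = -(((k + 1 : Nat) : Int)) := by push_cast; ring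
  have h2 : PySem.List.pyGetD (buildList N (c - 1)) (-(k : Int) - 1) PySem.Set.empty
      = buildB N (c - 1 - k) := by
    rw [hneg, PySem.List.pyGetD_neg_natCast _ _ _ (by omega)
        (by rw [length_buildList]; omega)]
    simp only [buildList, List.getElem_map, List.getElem_range, List.length_map,
      List.length_range]
    congr 1
    omega
  rw [h1, h2]
  have h3 : c - (1 + k) = c - 1 - k := by omega
  have h4 : 1 + k = k + 1 := by omega
  rw [h3, h4]
  simp [aCombine, aInsert_eq_bInsert]

-- the two main loops agree round by round
theorem go_eq (N number : Int) :
    ∀ (n k : Nat), k + n = 8 →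
      aGo N number (buildList N k) (PySem.List.pyRange ((k : Int) + 1) 9 1)
        = altGo N number (PySem.List.pyRange ((k : Int) + 1) 9 1) := by
  intro n
  induction n with
  | zero =>
    intro k hk
    have hk8 : k = 8 := by omega
    subst hk8
    rw [PySem.List.pyRange_one_eq_nil (by norm_num)]
    rfl
  | succ n ih =>
    intro k hk
    rw [PySem.List.pyRange_one_cons (by omega : (k : Int) + 1 < 9)]
    simp only [aGo, altGo]
    have hcnt : aCntSet N (buildList N k) ((k : Int) + 1) = buildB N (k + 1) := by
      have := aCntSet_eq_buildB N (k + 1) (by omega)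
      simpa using this
    have htn : ((k : Int) + 1).toNat = k + 1 := by omega
    rw [hcnt, htn]
    split
    · rfl
    · have hdp : buildList N k ++ [buildB N (k + 1)] = buildList N (k + 1) := by
        simp [buildList, List.range_succ]
      rw [hdp]
      have := ih (k + 1) (by omega)
      have hcast : ((k : Int) + 1) + 1 = (((k + 1 : Nat) : Int)) + 1 := by push_cast; ring
      rw [hcast]
      exact this

-- ===== VERDICT (by name: the statement is the Claim_ definition above) =====
theorem solution_spec : Claim_equal_solution := by
  intro N number _hdom _hpre
  unfold Spec_solution solution solution_alt
  have := go_eq N number 8 0 (by omega)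
  simpa [buildList] using this
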